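-- pv_equiv track=rewrite | github.com/kuro-vale/kuro-python | codewars/8 kyu/pillars.py | pillars
-- ===== SOURCE A (Python) =====
-- def pillars(num_pill, dist, width):
--     result = 0
--     dist *= 100
--     for i in range(1, num_pill):
--         result += dist
--     for i in range(1, num_pill - 1):
--         result += width
--     return result
-- ===== SOURCE B (Python) =====
-- def pillars(num_pill, dist, width):
--     # closed form instead of two loops
--     return dist * 100 * max(0, num_pill - 1) + width * max(0, num_pill - 2)
-- ===== Notes on version B (the rewrite author's own statement) =====
-- stated objective: faster
-- what changed: Replaced the two counting loops with the closed form dist*100*max(0,n-1) + width*max(0,n-2).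
import Mathlib
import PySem

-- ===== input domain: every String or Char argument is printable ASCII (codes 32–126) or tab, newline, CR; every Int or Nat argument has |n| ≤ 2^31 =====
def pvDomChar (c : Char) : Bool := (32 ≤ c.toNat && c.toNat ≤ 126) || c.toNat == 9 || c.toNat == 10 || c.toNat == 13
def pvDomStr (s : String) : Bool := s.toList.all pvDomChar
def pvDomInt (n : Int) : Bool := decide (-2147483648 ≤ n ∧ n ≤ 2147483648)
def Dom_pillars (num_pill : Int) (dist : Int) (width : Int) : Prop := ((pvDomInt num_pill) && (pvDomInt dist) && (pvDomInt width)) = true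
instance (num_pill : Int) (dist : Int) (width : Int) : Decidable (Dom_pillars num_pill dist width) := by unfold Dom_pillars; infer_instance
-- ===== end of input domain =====

-- B replaces A's two counting loops with the closed form dist*100*max(0,n-1) + width*max(0,n-2) (faster).


-- ===== PORT A =====
-- Literal port of A: two foldl loops over range(1, n) / range(1, n-1).
def pillars (num_pill : Int) (dist : Int) (width : Int) : Int :=
  let dist := dist * 100
  let result := (PySem.List.pyRange 1 num_pill 1).foldl (fun r _ => r + dist) 0
  (PySem.List.pyRange 1 (num_pill - 1) 1).foldl (fun r _ => r + width) result

-- ===== PORT B =====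
-- B: closed form, no loops.
def pillars_alt (num_pill : Int) (dist : Int) (width : Int) : Int :=
  dist * 100 * max 0 (num_pill - 1) + width * max 0 (num_pill - 2)

-- ===== PRECONDITION & SPEC =====
def Spec_pillars (num_pill : Int) (dist : Int) (width : Int) (out : Int) : Prop := out = pillars_alt num_pill dist width
instance (num_pill : Int) (dist : Int) (width : Int) (out : Int) : Decidable (Spec_pillars num_pill dist width out) := by unfold Spec_pillars; infer_instance

-- ===== CLAIM (what is proved, stated in full; the proofs are below) =====
def Claim_equal_pillars : Prop := ∀ (num_pill : Int) (dist : Int) (width : Int), Dom_pillars num_pill dist width → Spec_pillars num_pill dist width (pillars num_pill dist width)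

-- ===== LEMMAS AND PROOFS =====

-- ===== VERDICT (by name: the statement is the Claim_ definition above) =====
theorem foldl_add_const (c : Int) (l : List Int) (s : Int) :
    l.foldl (fun r _ => r + c) s = s + c * l.length := by
  induction l generalizing s with
  | nil => simp
  | cons x xs ih => simp [List.foldl, ih]; ring

theorem pillars_spec : Claim_equal_pillars := by
  intro n d w _
  unfold Spec_pillars pillars pillars_alt
  rw [foldl_add_const, foldl_add_const]
  simp [PySem.List.length_pyRange_one]
  have h1 : ((n.toNat - 1 : Nat) : Int) = max 0 (n - 1) := by omega
  have h2 : ((n.toNat - 1 - 1 : Nat) : Int) = max 0 (n - 2) := by omega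
  rw [h1, h2]
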